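-- pv_equiv track=rewrite | github.com/Nherv/Kaggle | hackerrank.py | xorSequenceNAIVE
-- ===== SOURCE A (Python) =====
-- def xorSequenceNAIVE(l, r):
--     if l==r:
--         return xorList(l)
--     nbElement = r-l+1
--     if nbElement%2 != 0:
--         result = xorList(l)
--         for i in range(l+2,r+1,2):
--             result = result^i
--     else:
--         result = l+1
--         for i in range(l+3,r+1,2):
--             result = result^i
--     return result
--
-- def xorList(n):
--     result = 0
--     for i in range(1,n+1):
--         result = result^i
--     return result
-- ===== SOURCE B (Python) =====
-- def xorSequenceNAIVE(l, r):
--     # Closed-form: O(1) arithmetic instead of O(r) loops (intended for 0 <= l).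
--     if l == r:
--         return _pref(l)
--     if (r - l + 1) % 2 != 0:
--         return _pref(l) ^ _xor_step2(l + 2, r)
--     return (l + 1) ^ _xor_step2(l + 3, r)
--
-- def _pref(n):
--     # XOR of 1..n in closed form (0 if n < 1).
--     if n < 1:
--         return 0
--     return (n, 1, n + 1, 0)[n % 4]
--
-- def _xor_step2(a, b):
--     # XOR of a, a+2, a+4, ..., up to b, in closed form.
--     if a > b:
--         return 0
--     k = (b - a) // 2          # index of the last term
--     t0 = a // 2               # halved terms run t0 .. t0+k
--     x = 2 * (_pref(t0 + k) ^ _pref(t0 - 1))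
--     if a % 2 == 1 and (k + 1) % 2 == 1:
--         x += 1
--     return x
-- ===== Notes on version B (the rewrite author's own statement) =====
-- stated objective: faster
-- what changed: A's two O(r) xor-accumulation loops (prefix xor 1..l and a step-2 range xor) are replaced by O(1) closed-form mod-4 formulas for the prefix xor and for the xor of an arithmetic step-2 range.
-- outside the precondition, e.g. on xorSequenceNAIVE(-6, -3): A returns 6, B returns -6; on xorSequenceNAIVE(-5, 3): A returns 0, B returns 2
import Mathlib
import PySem

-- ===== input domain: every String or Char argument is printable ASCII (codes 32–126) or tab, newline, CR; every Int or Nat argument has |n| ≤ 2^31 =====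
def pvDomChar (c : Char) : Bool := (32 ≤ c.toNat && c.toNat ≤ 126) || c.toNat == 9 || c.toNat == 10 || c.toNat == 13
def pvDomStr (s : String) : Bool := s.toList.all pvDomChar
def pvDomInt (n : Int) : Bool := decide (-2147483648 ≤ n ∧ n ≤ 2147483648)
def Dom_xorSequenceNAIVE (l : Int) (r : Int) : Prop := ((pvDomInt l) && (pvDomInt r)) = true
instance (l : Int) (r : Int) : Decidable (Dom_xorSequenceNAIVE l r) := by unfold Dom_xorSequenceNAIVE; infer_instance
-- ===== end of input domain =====

-- B replaces A's O(r) xor loops by O(1) closed-form mod-4 formulas; equality proved for 0 ≤ l.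

-- ===== PORT A =====
def xorList (n : Int) : Int :=
  (PySem.List.pyRange 1 (n + 1) 1).foldl (fun result i => PySem.Int.bxor result i) 0

def xorSequenceNAIVE (l : Int) (r : Int) : Int :=
  if l = r then xorList l
  else
    let nbElement := r - l + 1
    if PySem.Int.mod nbElement 2 ≠ 0 then
      (PySem.List.pyRange (l + 2) (r + 1) 2).foldl (fun result i => PySem.Int.bxor result i) (xorList l)
    else
      (PySem.List.pyRange (l + 3) (r + 1) 2).foldl (fun result i => PySem.Int.bxor result i) (l + 1)

-- ===== PORT B =====
def pvPref (n : Int) : Int :=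
  -- XOR of 1..n in closed form (Source B's tuple lookup (n, 1, n+1, 0)[n % 4], as an if-chain)
  if n < 1 then 0
  else if PySem.Int.mod n 4 = 0 then n
  else if PySem.Int.mod n 4 = 1 then 1
  else if PySem.Int.mod n 4 = 2 then n + 1
  else 0

def pvXorStep2 (a : Int) (b : Int) : Int :=
  -- XOR of a, a+2, a+4, ..., up to b, in closed form
  if a > b then 0
  else
    let k := PySem.Int.floordiv (b - a) 2
    let t0 := PySem.Int.floordiv a 2
    let x := 2 * PySem.Int.bxor (pvPref (t0 + k)) (pvPref (t0 - 1))
    if PySem.Int.mod a 2 = 1 ∧ PySem.Int.mod (k + 1) 2 = 1 then x + 1 else x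

def xorSequenceNAIVE_alt (l : Int) (r : Int) : Int :=
  if l = r then pvPref l
  else if PySem.Int.mod (r - l + 1) 2 ≠ 0 then PySem.Int.bxor (pvPref l) (pvXorStep2 (l + 2) r)
  else PySem.Int.bxor (l + 1) (pvXorStep2 (l + 3) r)

-- ===== PRECONDITION & SPEC =====
-- Pre_ excludes negative l, which lies outside the natural domain of this 1-indexed
-- cumulative-XOR sequence; there A's value is an accident of empty Python ranges and
-- two's-complement xor, and B's closed form does its own natural thing.
def Pre_xorSequenceNAIVE (l : Int) (r : Int) : Prop := 0 ≤ l
instance (l : Int) (r : Int) : Decidable (Pre_xorSequenceNAIVE l r) := by unfold Pre_xorSequenceNAIVE; infer_instance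
def pvWitness_xorSequenceNAIVE : Int × Int := (1, 5)

def Spec_xorSequenceNAIVE (l : Int) (r : Int) (out : Int) : Prop := out = xorSequenceNAIVE_alt l r
instance (l : Int) (r : Int) (out : Int) : Decidable (Spec_xorSequenceNAIVE l r out) := by unfold Spec_xorSequenceNAIVE; infer_instance

-- ===== CLAIM (what is proved, stated in full; the proofs are below) =====
def Claim_equal_xorSequenceNAIVE : Prop := ∀ (l : Int) (r : Int), Dom_xorSequenceNAIVE l r → Pre_xorSequenceNAIVE l r → Spec_xorSequenceNAIVE l r (xorSequenceNAIVE l r)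

-- ===== LEMMAS AND PROOFS =====

-- bit-level Nat fact: xor of (2m+bm) and (2n+bn) splits into high part and low bit
theorem pvNatBitXor (bm bn m n : ℕ) (hm : bm < 2) (hn : bn < 2) :
    (2*m+bm) ^^^ (2*n+bn) = 2*(m ^^^ n) + (bm ^^^ bn) := by
  apply Nat.eq_of_testBit_eq
  intro i
  cases i with
  | zero =>
    interval_cases bm <;> interval_cases bn <;>
      (simp [Nat.testBit_zero, Nat.add_mul_mod_self_left]; try omega)
  | succ j =>
    have h1 : (2*m+bm)/2 = m := by omega
    have h3 : (2*(m ^^^ n) + (bm ^^^ bn))/2 = m ^^^ n := by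
      interval_cases bm <;> interval_cases bn <;> simp <;> omega
    have h2 : (2*n+bn)/2 = n := by omega
    simp only [Nat.testBit_succ, Nat.xor_div_two, h1, h2, h3]

theorem pvBxorNonneg (x y : Int) (hx : 0 ≤ x) (hy : 0 ≤ y) : 0 ≤ PySem.Int.bxor x y := by
  rw [PySem.Int.bxor_of_nonneg hx hy]; positivity

theorem pvIxor (bx by' : Int) (x y : Int) (hx : 0 ≤ x) (hy : 0 ≤ y)
    (hbx : bx = 0 ∨ bx = 1) (hby : by' = 0 ∨ by' = 1) :
    PySem.Int.bxor (2*x + bx) (2*y + by') =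
      2 * PySem.Int.bxor x y + (if bx = by' then 0 else 1) := by
  have h1 : 0 ≤ 2*x + bx := by omega
  have h2 : 0 ≤ 2*y + by' := by omega
  rw [PySem.Int.bxor_of_nonneg h1 h2, PySem.Int.bxor_of_nonneg hx hy]
  have e1 : (2*x + bx).toNat = 2 * x.toNat + bx.toNat := by omega
  have e2 : (2*y + by').toNat = 2 * y.toNat + by'.toNat := by omega
  rw [e1, e2, pvNatBitXor _ _ _ _ (by omega) (by omega)]
  rcases hbx with h | h <;> rcases hby with h' | h' <;> subst h h' <;> simp

theorem pvCor00 (x y : Int) (hx : 0 ≤ x) (hy : 0 ≤ y) :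
    PySem.Int.bxor (2*x) (2*y) = 2 * PySem.Int.bxor x y := by
  have := pvIxor 0 0 x y hx hy (Or.inl rfl) (Or.inl rfl); simpa using this
theorem pvCor01 (x y : Int) (hx : 0 ≤ x) (hy : 0 ≤ y) :
    PySem.Int.bxor (2*x) (2*y+1) = 2 * PySem.Int.bxor x y + 1 := by
  have := pvIxor 0 1 x y hx hy (Or.inl rfl) (Or.inr rfl); simpa using this
theorem pvCor10 (x y : Int) (hx : 0 ≤ x) (hy : 0 ≤ y) :
    PySem.Int.bxor (2*x+1) (2*y) = 2 * PySem.Int.bxor x y + 1 := by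
  have := pvIxor 1 0 x y hx hy (Or.inr rfl) (Or.inl rfl); simpa using this
theorem pvCor11 (x y : Int) (hx : 0 ≤ x) (hy : 0 ≤ y) :
    PySem.Int.bxor (2*x+1) (2*y+1) = 2 * PySem.Int.bxor x y := by
  have := pvIxor 1 1 x y hx hy (Or.inr rfl) (Or.inr rfl); simpa using this

theorem pvZeroBxor (x : Int) : PySem.Int.bxor 0 x = x := by
  rw [PySem.Int.bxor_comm, PySem.Int.bxor_zero]

theorem pvBxorAssoc (x y z : Int) (hx : 0 ≤ x) (hy : 0 ≤ y) (hz : 0 ≤ z) :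
    PySem.Int.bxor (PySem.Int.bxor x y) z = PySem.Int.bxor x (PySem.Int.bxor y z) := by
  rw [PySem.Int.bxor_of_nonneg hx hy, PySem.Int.bxor_of_nonneg hy hz,
      PySem.Int.bxor_of_nonneg (by positivity) hz, PySem.Int.bxor_of_nonneg hx (by positivity)]
  simp [Nat.xor_assoc]

theorem pvCancel (p t : Int) (hp : 0 ≤ p) (ht : 0 ≤ t) :
    PySem.Int.bxor (PySem.Int.bxor p t) p = t := by
  rw [PySem.Int.bxor_of_nonneg hp ht, PySem.Int.bxor_of_nonneg (by positivity) hp]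
  rw [Int.toNat_natCast, Nat.xor_comm p.toNat t.toNat, Nat.xor_assoc, Nat.xor_self, Nat.xor_zero]
  omega

theorem pvPrefNonneg (n : Int) : 0 ≤ pvPref n := by
  unfold pvPref; split_ifs <;> omega

-- the mod-4 closed form absorbs one more term
theorem pvPrefStep (n : Int) (hn : 0 ≤ n) :
    PySem.Int.bxor (pvPref n) (n + 1) = pvPref (n + 1) := by
  have hm : ∀ m : Int, PySem.Int.mod m 4 = m % 4 := fun m =>
    PySem.Int.mod_eq_emod_of_pos (by norm_num)
  unfold pvPref
  simp only [hm]
  rcases (by omega : n = 0 ∨ (0 < n ∧ n % 4 = 0) ∨ n % 4 = 1 ∨ n % 4 = 2 ∨ (0 < n ∧ n % 4 = 3)) with h | h | h | h | h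
  · subst h; decide
  · obtain ⟨x, hx, hx0⟩ : ∃ x, n = 2*x ∧ 0 ≤ x := ⟨n/2, by omega, by omega⟩
    split_ifs <;> try omega
    rw [hx, pvCor01 x x hx0 hx0, PySem.Int.bxor_self]; omega
  · obtain ⟨x, hx, hx0⟩ : ∃ x, n + 1 = 2*x ∧ 0 ≤ x := ⟨(n+1)/2, by omega, by omega⟩
    split_ifs <;> try omega
    rw [hx, show (1 : Int) = 2*0+1 from rfl, pvCor10 0 x le_rfl hx0, pvZeroBxor]
    omega
  · split_ifs <;> try omega
    rw [PySem.Int.bxor_self]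
  · split_ifs <;> try omega
    rw [pvZeroBxor]

theorem pvPrefLoopNat (m : Nat) :
    (PySem.List.pyRange 1 ((m : Int) + 1) 1).foldl (fun result i => PySem.Int.bxor result i) 0
      = pvPref m := by
  induction m with
  | zero => simp [PySem.List.pyRange_one_eq_nil (by norm_num : (1:Int) ≤ 1)]; decide
  | succ m ih =>
    have e : ((m + 1 : Nat) : Int) + 1 = ((m : Int) + 1) + 1 := by push_cast; ring
    rw [e, PySem.List.pyRange_one_succ_right (by omega : (1:Int) ≤ (m:Int)+1),
        List.foldl_append]
    simp only [List.foldl_cons, List.foldl_nil]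
    rw [ih, pvPrefStep m (by omega)]
    norm_num

-- A's helper loop equals B's mod-4 closed form, for every n
theorem pvPrefLoop (n : Int) : xorList n = pvPref n := by
  unfold xorList
  by_cases hn : 0 ≤ n
  · have := pvPrefLoopNat n.toNat
    rwa [show ((n.toNat : Int)) = n from by omega] at this
  · rw [PySem.List.pyRange_one_eq_nil (by omega),
        show pvPref n = 0 from by unfold pvPref; rw [if_pos (by omega)]]
    rfl

-- prefix forms over adjacent arguments cancel to the argument itself
theorem pvPrefPair (t : Int) (ht : 0 ≤ t) :
    PySem.Int.bxor (pvPref t) (pvPref (t - 1)) = t := by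
  rcases eq_or_lt_of_le ht with h | h
  · subst h; decide
  · have := pvPrefStep (t-1) (by omega)
    rw [show t - 1 + 1 = t from by ring] at this
    rw [← this, pvCancel _ _ (pvPrefNonneg _) (by omega)]

theorem pvShift (t0 u : Int) (ht : 0 ≤ t0) (hu : 0 ≤ u) :
    PySem.Int.bxor u (pvPref (t0 - 1)) =
      PySem.Int.bxor t0 (PySem.Int.bxor u (pvPref t0)) := by
  rcases eq_or_lt_of_le ht with h | h
  · rw [← h]; norm_num
    rw [show pvPref (-1) = 0 from by decide, show pvPref 0 = 0 from by decide,
        PySem.Int.bxor_zero, pvZeroBxor]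
  · have hstep := pvPrefStep (t0-1) (by omega)
    rw [show t0 - 1 + 1 = t0 from by ring] at hstep
    rw [← hstep]
    have hq := pvPrefNonneg (t0 - 1)
    rw [PySem.Int.bxor_of_nonneg hu hq,
        PySem.Int.bxor_of_nonneg hq ht,
        PySem.Int.bxor_of_nonneg hu (by positivity),
        PySem.Int.bxor_of_nonneg ht (by positivity)]
    simp only [Int.toNat_natCast]
    norm_cast
    simp [Nat.xor_comm, Nat.xor_left_comm]

theorem pvStep2Nonneg (a b : Int) : 0 ≤ pvXorStep2 a b := by
  unfold pvXorStep2
  have h1 := pvBxorNonneg _ _ (pvPrefNonneg (PySem.Int.floordiv a 2 + PySem.Int.floordiv (b-a) 2))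
    (pvPrefNonneg (PySem.Int.floordiv a 2 - 1))
  split_ifs with h
  · norm_num
  · dsimp only
    split_ifs <;> omega

-- peeling the first term off the closed form for a step-2 xor
theorem pvStep2Cons (a b : Int) (ha : 0 ≤ a) (hab : a ≤ b) :
    pvXorStep2 a b = PySem.Int.bxor a (pvXorStep2 (a + 2) b) := by
  have hfd : ∀ m : Int, PySem.Int.floordiv m 2 = m / 2 := fun m =>
    PySem.Int.floordiv_eq_ediv_of_pos (by norm_num)
  have hmd : ∀ m : Int, PySem.Int.mod m 2 = m % 2 := fun m =>
    PySem.Int.mod_eq_emod_of_pos (by norm_num)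
  unfold pvXorStep2
  simp only [hfd, hmd]
  set t0 := a / 2 with ht0
  set k := (b - a) / 2 with hk
  have hkn : 0 ≤ k := by omega
  have ht0n : 0 ≤ t0 := by omega
  have hpa : a = 2 * t0 + a % 2 := by omega
  have hu := pvPrefNonneg (t0 + k)
  have hq0 := pvPrefNonneg t0
  have hq' := pvPrefNonneg (t0 - 1)
  by_cases hb : a + 2 > b
  · -- k = 0 : the closed form describes the single term a
    have hk0 : k = 0 := by omega
    simp only [if_neg (by omega : ¬ a > b), if_pos hb, PySem.Int.bxor_zero, hk0, add_zero]
    rw [pvPrefPair t0 ht0n]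
    rcases (by omega : a % 2 = 0 ∨ a % 2 = 1) with hp | hp
    · rw [if_neg (by omega)]; omega
    · rw [if_pos (by constructor <;> omega)]; omega
  · -- k ≥ 1
    have hk1 : 1 ≤ k := by omega
    have e1 : (a + 2) / 2 = t0 + 1 := by omega
    have e2 : (b - (a + 2)) / 2 = k - 1 := by omega
    simp only [if_neg (by omega : ¬ a > b), if_neg (by omega : ¬ a + 2 > b), e1, e2]
    have e3 : t0 + 1 + (k - 1) = t0 + k := by ring
    have e4 : t0 + 1 - 1 = t0 := by ring
    rw [e3, e4]
    set u := pvPref (t0 + k)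
    set q0 := pvPref t0
    set q' := pvPref (t0 - 1)
    have hR' : 0 ≤ PySem.Int.bxor u q0 := pvBxorNonneg _ _ hu hq0
    have hshift := pvShift t0 u ht0n hu
    have e5 : (a + 2) % 2 = a % 2 := by omega
    rw [e5]
    rcases (by omega : a % 2 = 0 ∨ a % 2 = 1) with hp | hp
    · rw [if_neg (by omega), if_neg (by omega)]
      rw [show a = 2 * t0 from by omega, pvCor00 t0 _ ht0n hR', ← hshift]
    · rcases (by omega : k % 2 = 0 ∨ k % 2 = 1) with hkp | hkp
      · rw [if_pos (by constructor <;> omega), if_neg (by omega)]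
        rw [show a = 2 * t0 + 1 from by omega, pvCor10 t0 _ ht0n hR', ← hshift]
      · rw [if_neg (by omega), if_pos (by constructor <;> omega)]
        rw [show a = 2 * t0 + 1 from by omega, pvCor11 t0 _ ht0n hR', ← hshift]

theorem pvRangeTwoCons (a c : Int) (h : a < c) :
    PySem.List.pyRange a c 2 = a :: PySem.List.pyRange (a + 2) c 2 := by
  rw [PySem.List.pyRange_of_pos a c (by norm_num), PySem.List.pyRange_of_pos (a+2) c (by norm_num)]
  rw [if_pos h]
  by_cases h2 : a + 2 < c
  · rw [if_pos h2]
    have eN : ((c - a + 2 - 1)/2).toNat = ((c - (a+2) + 2 - 1)/2).toNat + 1 := by omega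
    rw [eN, List.range_succ_eq_map]
    simp only [List.map_cons, List.map_map]
    congr 1
    · norm_num
    · apply List.map_congr_left
      intro k _
      simp [Function.comp, Nat.succ_eq_add_one]
      ring
  · rw [if_neg h2]
    have eN : ((c - a + 2 - 1)/2).toNat = 1 := by omega
    rw [eN]
    simp

theorem pvRangeTwoNil (a c : Int) (h : c ≤ a) : PySem.List.pyRange a c 2 = [] := by
  rw [PySem.List.pyRange_of_pos a c (by norm_num), if_neg (by omega)]
  simp

theorem pvStep2Empty (a b : Int) (h : b < a) : pvXorStep2 a b = 0 := by
  unfold pvXorStep2; rw [if_pos (by omega)]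

-- A's step-2 xor loop equals B's closed form (fuel n bounds the number of terms)
theorem pvLoop2 (n : Nat) : ∀ (a b s : Int), 0 ≤ a → 0 ≤ s → b - a < 2 * n →
    (PySem.List.pyRange a (b + 1) 2).foldl (fun result i => PySem.Int.bxor result i) s =
      PySem.Int.bxor s (pvXorStep2 a b) := by
  induction n with
  | zero =>
    intro a b s _ _ h
    rw [pvRangeTwoNil _ _ (by omega), pvStep2Empty _ _ (by omega), PySem.Int.bxor_zero]
    rfl
  | succ n ih =>
    intro a b s ha hs h
    by_cases hab : a ≤ b
    · rw [pvRangeTwoCons _ _ (by omega)]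
      simp only [List.foldl_cons]
      rw [ih (a+2) b (PySem.Int.bxor s a) (by omega) (pvBxorNonneg _ _ hs ha) (by omega),
          pvBxorAssoc _ _ _ hs ha (pvStep2Nonneg _ _),
          ← pvStep2Cons a b ha hab]
    · rw [pvRangeTwoNil _ _ (by omega), pvStep2Empty _ _ (by omega), PySem.Int.bxor_zero]
      rfl

-- ===== VERDICT (by name: the statement is the Claim_ definition above) =====
theorem xorSequenceNAIVE_spec : Claim_equal_xorSequenceNAIVE := by
  intro l r _ hpre
  unfold Spec_xorSequenceNAIVE xorSequenceNAIVE xorSequenceNAIVE_alt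
  have hl : 0 ≤ l := hpre
  by_cases hlr : l = r
  · rw [if_pos hlr, if_pos hlr, pvPrefLoop]
  · rw [if_neg hlr, if_neg hlr]
    by_cases hpar : PySem.Int.mod (r - l + 1) 2 ≠ 0
    · rw [if_pos hpar, if_pos hpar, pvPrefLoop,
          pvLoop2 ((r - l).toNat + 2) (l+2) r (pvPref l) (by omega) (pvPrefNonneg l) (by omega)]
    · rw [if_neg hpar, if_neg hpar,
          pvLoop2 ((r - l).toNat + 2) (l+3) r (l+1) (by omega) (by omega) (by omega)]
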